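-- pv_equiv track=rewrite | github.com/IrinaNizova/Funbox- | api/v1/views.py | create_redis_key_pattern
-- ===== SOURCE A (Python) =====
-- def create_redis_key_pattern(_from, _to):
--     pattern_key = ''
--     end_match = False
--     for i in range(len(_to)):
--         if end_match:
--             pattern_key += '?'
--         else:
--             if _from[i] == _to[i]:
--                 pattern_key += _to[i]
--             else:
--                 pattern_key += f'[{_from[i]}-{_to[i]}]'
--                 end_match = True
--     return pattern_key
-- ===== SOURCE B (Python) =====
-- def create_redis_key_pattern(_from, _to):
--     k = next((i for i in range(len(_to)) if _from[i] != _to[i]), None)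
--     if k is None:
--         return _to
--     return _to[:k] + f'[{_from[k]}-{_to[k]}]' + '?' * (len(_to) - k - 1)
-- ===== Notes on version B (the rewrite author's own statement) =====
-- stated objective: simpler
-- what changed: Replaces the per-character loop with an end_match flag by locating the first mismatch index and assembling the result from a prefix slice, one bracket group and '?' string multiplication.
import Mathlib
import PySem

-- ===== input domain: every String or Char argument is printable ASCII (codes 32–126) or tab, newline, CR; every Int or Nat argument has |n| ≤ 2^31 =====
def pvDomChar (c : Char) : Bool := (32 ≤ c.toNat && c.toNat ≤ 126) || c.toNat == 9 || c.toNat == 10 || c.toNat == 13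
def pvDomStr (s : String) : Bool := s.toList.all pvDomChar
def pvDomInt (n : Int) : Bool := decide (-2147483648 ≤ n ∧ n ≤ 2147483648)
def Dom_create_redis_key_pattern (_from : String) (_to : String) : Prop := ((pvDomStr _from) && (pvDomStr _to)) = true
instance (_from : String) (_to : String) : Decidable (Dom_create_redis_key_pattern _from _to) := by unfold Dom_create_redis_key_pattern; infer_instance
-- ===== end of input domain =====

-- B replaces A's per-character loop with an end_match flag by a first-mismatch-index
-- search plus slice/replicate assembly (objective: simpler).

-- ===== PORT A =====
-- A's for-loop over range(len(_to)) with accumulator (pattern_key, end_match);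
-- character access _from[i]/_to[i] is rendered as getD (in range for every access
-- A actually performs on inputs satisfying Pre_, where Python A does not raise).
def goA (fl tl : List Char) : List Nat → Bool → List Char → List Char
  | [], _, acc => acc
  | i :: rest, em, acc =>
    if em then goA fl tl rest em (acc ++ ['?'])
    else if fl.getD i ' ' == tl.getD i ' ' then goA fl tl rest em (acc ++ [tl.getD i ' '])
    else goA fl tl rest true (acc ++ ['[', fl.getD i ' ', '-', tl.getD i ' ', ']'])

def create_redis_key_pattern (_from : String) (_to : String) : String :=
  String.mk (goA _from.toList _to.toList (List.range _to.toList.length) false [])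

-- ===== PORT B =====
-- first mismatch index (next(...) over the generator), then slice + bracket + '?' * rest
def create_redis_key_pattern_alt (_from : String) (_to : String) : String :=
  let fl := _from.toList
  let tl := _to.toList
  match (List.range tl.length).find? (fun i => fl.getD i ' ' != tl.getD i ' ') with
  | none => _to
  | some k =>
      String.mk (tl.take k ++ ['[', fl.getD k ' ', '-', tl.getD k ' ', ']']
        ++ List.replicate (tl.length - k - 1) '?')

-- ===== PRECONDITION & SPEC =====
-- Python A raises IndexError exactly when _from is a strictly shorter prefix of _to
-- (the loop reaches i = len(_from) with every earlier character equal); B raises there too.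
def Pre_create_redis_key_pattern (_from : String) (_to : String) : Prop :=
  _from.toList.length < _to.toList.length →
    _from.toList ≠ _to.toList.take _from.toList.length
instance (_from : String) (_to : String) : Decidable (Pre_create_redis_key_pattern _from _to) := by
  unfold Pre_create_redis_key_pattern; infer_instance
def pvWitness_create_redis_key_pattern : String × String := ("abc", "abd")

def Spec_create_redis_key_pattern (_from : String) (_to : String) (out : String) : Prop := out = create_redis_key_pattern_alt _from _to
instance (_from : String) (_to : String) (out : String) : Decidable (Spec_create_redis_key_pattern _from _to out) := by unfold Spec_create_redis_key_pattern; infer_instance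

-- ===== CLAIM (what is proved, stated in full; the proofs are below) =====
def Claim_equal_create_redis_key_pattern : Prop := ∀ (_from : String) (_to : String), Dom_create_redis_key_pattern _from _to → Pre_create_redis_key_pattern _from _to → Spec_create_redis_key_pattern _from _to (create_redis_key_pattern _from _to)

-- ===== LEMMAS AND PROOFS =====

-- once end_match is set, the tail of the loop only appends '?'s
theorem goA_true (fl tl : List Char) (l : List Nat) (acc : List Char) :
    goA fl tl l true acc = acc ++ List.replicate l.length '?' := by
  induction l generalizing acc with
  | nil => simp [goA]
  | cons i rest ih => simp [goA, ih, List.replicate_succ]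

-- main loop characterisation over an arbitrary index window range' s m
theorem goA_range' (fl tl : List Char) (m : Nat) :
    ∀ (s : Nat) (acc : List Char),
    goA fl tl (List.range' s m) false acc =
      match (List.range' s m).find? (fun i => fl.getD i ' ' != tl.getD i ' ') with
      | none => acc ++ (List.range' s m).map (fun i => tl.getD i ' ')
      | some k => acc ++ (List.range' s (k - s)).map (fun i => tl.getD i ' ')
          ++ ['[', fl.getD k ' ', '-', tl.getD k ' ', ']']
          ++ List.replicate (s + m - k - 1) '?' := by
  induction m with
  | zero => intro s acc; simp [goA]
  | succ m ih =>
    intro s acc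
    rw [List.range'_succ]
    by_cases h : fl.getD s ' ' = tl.getD s ' '
    · have hp : (fl.getD s ' ' != tl.getD s ' ') = false := by
        simp [List.getD] at h ⊢; simp [h]
      simp only [goA, List.find?_cons, hp]
      rw [if_neg (by simp : ¬ (false = true)),
          if_pos (by simp [List.getD] at h ⊢; simp [h] : (fl.getD s ' ' == tl.getD s ' ') = true)]
      rw [ih (s + 1) (acc ++ [tl.getD s ' '])]
      cases hf : (List.range' (s + 1) m).find? (fun i => fl.getD i ' ' != tl.getD i ' ') with
      | none => simp only [hf]; simp
      | some k =>
        have hk : k ∈ List.range' (s + 1) m := List.mem_of_find?_eq_some hf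
        have hk1 : s + 1 ≤ k := (List.mem_range'_1.mp hk).1
        have hrange : List.range' s (k - s) = s :: List.range' (s + 1) (k - (s + 1)) := by
          have h2 : k - s = (k - (s + 1)) + 1 := by omega
          rw [h2, List.range'_succ]
        have hms : s + (m + 1) = (s + 1) + m := by omega
        simp only [hf, hrange, hms, List.map_cons, List.append_assoc, List.cons_append,
          List.nil_append, List.singleton_append]
    · have hp : (fl.getD s ' ' != tl.getD s ' ') = true := by
        simp [List.getD] at h ⊢; simp [h]
      simp only [goA, List.find?_cons, hp]
      rw [if_neg (by simp : ¬ (false = true)),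
          if_neg (by simp [List.getD] at h ⊢; simp [h] : ¬ ((fl.getD s ' ' == tl.getD s ' ') = true))]
      rw [goA_true]
      have hm : s + (m + 1) - s - 1 = m := by omega
      simp [hm, List.range'_zero]

theorem map_getD_range' (tl : List Char) (s m : Nat) (h : s + m ≤ tl.length) :
    (List.range' s m).map (fun i => tl.getD i ' ') = (tl.drop s).take m := by
  induction m generalizing s with
  | zero => simp
  | succ m ih =>
    rw [List.range'_succ, List.map_cons, ih (s + 1) (by omega)]
    have hs : s < tl.length := by omega
    rw [List.getD_eq_getElem _ _ hs]
    rw [List.drop_eq_getElem_cons hs, List.take_succ_cons]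

-- ===== VERDICT (by name: the statement is the Claim_ definition above) =====
theorem create_redis_key_pattern_spec : Claim_equal_create_redis_key_pattern := by
  intro f t _ hpre
  unfold Spec_create_redis_key_pattern create_redis_key_pattern create_redis_key_pattern_alt
  set fl := f.toList with hfl
  set tl := t.toList with htl
  simp only []
  rw [List.range_eq_range', goA_range' fl tl tl.length 0]
  cases hf : (List.range' 0 tl.length).find? (fun i => fl.getD i ' ' != tl.getD i ' ') with
  | none =>
    -- every index agrees: A rebuilds _to character by character, B returns _to
    simp only [hf]
    rw [map_getD_range' tl 0 tl.length (by omega)]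
    simp only [List.nil_append, List.drop_zero, List.take_length]
    exact String.ofList_toList
  | some k =>
    have hk : k ∈ List.range' 0 tl.length := List.mem_of_find?_eq_some hf
    have hk2 : k < tl.length := by
      have := List.mem_range'_1.mp hk; omega
    simp only [hf]
    rw [map_getD_range' tl 0 (k - 0) (by omega)]
    simp
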